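-- pv_equiv track=rewrite | github.com/Xarvie/sharp | check_phase6_deep.py | check_char_literals
-- ===== SOURCE A (Python) =====
-- def check_char_literals(fname, content):
--     """Find char literals that might have broken quotes."""
--     issues = []
--     # Walk through and track single-quote contexts
--     i = 0
--     while i < len(content):
--         if content[i] == "'" and (i == 0 or content[i-1] != '\\'):
--             # Start of char literal
--             j = i + 1
--             while j < len(content):
--                 if content[j] == '\\' and j + 1 < len(content):
--                     j += 2  # skip escape
--                     continue
--                 if content[j] == "'":
--                     break
--                 j += 1
--             if j >= len(content) or content[j] != "'":
--                 issues.append(f"  UNCLOSED char literal at pos {i}: {repr(content[i:min(i+20, len(content))])}")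
--             elif j - i > 10:
--                 # Very long char literal - suspicious
--                 char_content = content[i+1:j]
--                 if '"' in char_content and len(char_content) > 4:
--                     # Has " and is long - might be spanning multiple tokens
--                     pass  # not necessarily a bug
--             i = j + 1
--         else:
--             i += 1
--     return issues
-- ===== SOURCE B (Python) =====
-- def check_char_literals(fname, content):
--     """Find char literals that might have broken quotes (flat single-pass state machine)."""
--     issues = []
--     n = len(content)
--     inside = False
--     start = 0
--     k = 0
--     while k < n:
--         c = content[k]
--         if not inside:
--             if c == "'" and (k == 0 or content[k-1] != '\\'):
--                 inside = True
--                 start = k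
--             k += 1
--         else:
--             if c == '\\' and k + 1 < n:
--                 k += 2
--             elif c == "'":
--                 inside = False
--                 k += 1
--             else:
--                 k += 1
--     if inside:
--         issues.append(f"  UNCLOSED char literal at pos {start}: {repr(content[start:min(start+20, n)])}")
--     return issues
-- ===== Notes on version B (the rewrite author's own statement) =====
-- stated objective: alternative
-- what changed: Replaced A's nested loops (outer scan plus an inner literal-consuming loop with a post-hoc unclosed test) by one flat single-pass state machine (outside/inside flags plus a saved start index) that reports the unclosed literal only once, at end of input.
import Mathlib
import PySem

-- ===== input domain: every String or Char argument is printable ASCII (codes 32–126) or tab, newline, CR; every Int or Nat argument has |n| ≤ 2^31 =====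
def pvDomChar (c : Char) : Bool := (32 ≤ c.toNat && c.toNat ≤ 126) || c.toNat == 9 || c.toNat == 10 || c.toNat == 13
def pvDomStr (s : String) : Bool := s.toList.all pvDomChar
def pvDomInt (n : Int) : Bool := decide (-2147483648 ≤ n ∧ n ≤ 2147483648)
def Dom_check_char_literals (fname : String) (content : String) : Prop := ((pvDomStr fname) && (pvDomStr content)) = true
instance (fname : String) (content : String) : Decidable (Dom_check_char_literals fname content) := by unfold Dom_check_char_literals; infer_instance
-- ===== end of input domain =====

-- B is a flat single-pass state machine instead of A's nested loops; same return value, no speed claim.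

-- shared helper: Python's built-in repr() on a string, exact for the printable-ASCII + tab/newline/CR domain
def pyReprChar (q c : Char) : List Char :=
  if c = '\\' then ['\\', '\\']
  else if c = q then ['\\', q]
  else if c = '\t' then ['\\', 't']
  else if c = '\n' then ['\\', 'n']
  else if c = '\r' then ['\\', 'r']
  else [c]

def pyRepr (s : List Char) : List Char :=
  let q : Char := if s.contains '\'' ∧ ¬ s.contains '\"' then '\"' else '\''
  q :: s.flatMap (pyReprChar q) ++ [q]

-- the f-string "  UNCLOSED char literal at pos {i}: {repr(content[i:min(i+20, len(content))])}"
-- (content[a:b] with 0 ≤ a ≤ b ≤ len is drop a, take (b-a))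
def unclosedMsg (cs : List Char) (i : Nat) : String :=
  "  UNCLOSED char literal at pos " ++ PySem.Int.toStr (i : Int) ++ ": " ++
    String.ofList (pyRepr ((cs.drop i).take (min (i + 20) cs.length - i)))

-- ===== PORT A =====
-- inner while loop: advances j over the literal body, skipping two-char escapes
def aInner (cs : List Char) (j : Nat) : Nat :=
  if h : j < cs.length then
    if cs[j] = '\\' ∧ j + 1 < cs.length then aInner cs (j + 2)
    else if cs[j] = '\'' then j
    else aInner cs (j + 1)
  else j
termination_by cs.length - j

-- needed by aOuter's termination proof
theorem aInner_ge (cs : List Char) (j : Nat) : j ≤ aInner cs j := by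
  fun_induction aInner cs j <;> omega

-- outer while loop; `cs.getD (i-1) ' '` renders content[i-1], which Python only evaluates when 0 < i < len.
-- A's `elif j - i > 10` branch only executes `pass`, so it is a no-op and contributes nothing.
def aOuter (_fname : String) (cs : List Char) (i : Nat) (issues : List String) : List String :=
  if h : i < cs.length then
    if cs[i] = '\'' ∧ (i = 0 ∨ cs.getD (i - 1) ' ' ≠ '\\') then
      let j := aInner cs (i + 1)
      let issues' :=
        if hj : j < cs.length then
          if cs[j] = '\'' then issues else issues ++ [unclosedMsg cs i]
        else issues ++ [unclosedMsg cs i]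
      aOuter _fname cs (j + 1) issues'
    else aOuter _fname cs (i + 1) issues
  else issues
termination_by cs.length - i
decreasing_by
  · have := aInner_ge cs (i + 1); omega
  · omega

def check_char_literals (fname : String) (content : String) : List String :=
  aOuter fname content.toList 0 []

-- ===== PORT B =====
-- the single flat loop: inside = currently within a char literal, start = its opening position
def bLoop (cs : List Char) (k : Nat) (inside : Bool) (start : Nat) : Bool × Nat :=
  if h : k < cs.length then
    if inside = false then
      if cs[k] = '\'' ∧ (k = 0 ∨ cs.getD (k - 1) ' ' ≠ '\\') then bLoop cs (k + 1) true k
      else bLoop cs (k + 1) false start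
    else
      if cs[k] = '\\' ∧ k + 1 < cs.length then bLoop cs (k + 2) true start
      else if cs[k] = '\'' then bLoop cs (k + 1) false start
      else bLoop cs (k + 1) true start
  else (inside, start)
termination_by cs.length - k

def check_char_literals_alt (fname : String) (content : String) : List String :=
  let cs := content.toList
  match bLoop cs 0 false 0 with
  | (true, start) => [unclosedMsg cs start]
  | (false, _) => []

-- ===== PRECONDITION & SPEC =====
def Spec_check_char_literals (fname : String) (content : String) (out : List String) : Prop := out = check_char_literals_alt fname content
instance (fname : String) (content : String) (out : List String) : Decidable (Spec_check_char_literals fname content out) := by unfold Spec_check_char_literals; infer_instance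

-- ===== CLAIM (what is proved, stated in full; the proofs are below) =====
def Claim_equal_check_char_literals : Prop := ∀ (fname : String) (content : String), Dom_check_char_literals fname content → Spec_check_char_literals fname content (check_char_literals fname content)

-- ===== LEMMAS AND PROOFS =====

-- the result rendering of bLoop's final state
def bRes (cs : List Char) : Bool × Nat → List String
  | (true, start) => [unclosedMsg cs start]
  | (false, _) => []

-- aInner stops either past the end or on a quote
theorem aInner_close (cs : List Char) (j : Nat) (h : aInner cs j < cs.length) :
    cs[aInner cs j] = '\'' := by
  fun_induction aInner cs j <;> simp_all

-- running bLoop from inside a literal = run aInner, then continue outside (or end inside)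
theorem bLoop_inside (cs : List Char) (j : Nat) (s : Nat) :
    bLoop cs j true s =
      if aInner cs j < cs.length then bLoop cs (aInner cs j + 1) false s else (true, s) := by
  fun_induction aInner cs j with
  | case1 j h hesc ih =>
    rw [bLoop]; simp only [h, dif_pos, hesc]
    simpa using ih
  | case2 j h hesc hq =>
    rw [bLoop]; simp [h, hq]
  | case3 j h hesc hq ih =>
    rw [bLoop]; simp only [h, dif_pos, hesc, hq]
    simpa [hq] using ih
  | case4 j h =>
    rw [bLoop]; simp [h]

-- main invariant: A's outer loop = accumulated issues ++ rendering of B's flat loop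
theorem aOuter_eq_bLoop (fname : String) (cs : List Char) :
    ∀ m i, cs.length - i ≤ m → ∀ issues s0,
      aOuter fname cs i issues = issues ++ bRes cs (bLoop cs i false s0) := by
  intro m
  induction m with
  | zero =>
    intro i hi issues s0
    have h : ¬ i < cs.length := by omega
    rw [aOuter, bLoop]; simp [h, bRes]
  | succ m ih =>
    intro i hi issues s0
    by_cases h : i < cs.length
    · by_cases hc : cs[i] = '\'' ∧ (i = 0 ∨ cs.getD (i - 1) ' ' ≠ '\\')
      · -- opening quote: A runs the inner loop; B switches state
        have hb : bLoop cs i false s0 = bLoop cs (i + 1) true i := by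
          rw [bLoop, dif_pos h, if_pos rfl, if_pos hc]
        rw [aOuter]
        simp only [h, dif_pos, hc]
        set j := aInner cs (i + 1) with hj
        have hji : i + 1 ≤ j := aInner_ge cs (i + 1)
        rw [hb, bLoop_inside]
        by_cases hlt : j < cs.length
        · have hq : cs[j] = '\'' := aInner_close cs (i + 1) hlt
          simp only [← hj, hlt, if_pos, hq, dif_pos, if_pos]
          exact ih (j + 1) (by omega) issues i
        · simp only [← hj, hlt, if_neg, dif_neg, not_false_iff]
          have hend : ¬ j + 1 < cs.length := by omega
          rw [aOuter]; simp [hend, bRes]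
      · -- not an opening quote: both step one character
        have hb : bLoop cs i false s0 = bLoop cs (i + 1) false s0 := by
          rw [bLoop, dif_pos h, if_pos rfl, if_neg hc]
        rw [aOuter]
        simp only [h, dif_pos, hc, if_neg, not_false_iff]
        rw [hb]
        exact ih (i + 1) (by omega) issues s0
    · rw [aOuter, bLoop]; simp [h, bRes]

-- ===== VERDICT (by name: the statement is the Claim_ definition above) =====
theorem check_char_literals_spec : Claim_equal_check_char_literals := by
  intro fname content _
  unfold Spec_check_char_literals check_char_literals check_char_literals_alt
  rw [aOuter_eq_bLoop fname content.toList content.toList.length 0 (by omega) [] 0]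
  cases hb : bLoop content.toList 0 false 0 with
  | mk b st => cases b <;> simp [hb, bRes]
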